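-- pv_equiv track=rewrite | github.com/EduardoMoraton/aoe2023 | Day 12/1/main.py | generate_combinations
-- ===== SOURCE A (Python) =====
-- from itertools import product
--
-- def generate_combinations(spring_condition):
--     question_indices = [i for i, char in enumerate(spring_condition) if char == "?"]
--
--     replacements = product("#.", repeat=len(question_indices))
--
--     combinations = []
--     for replacement in replacements:
--         current_combination = list(spring_condition)
--         for index, rep_char in zip(question_indices, replacement):
--             current_combination[index] = rep_char
--         combinations.append("".join(current_combination))
--
--     return combinations
-- ===== SOURCE B (Python) =====
-- def generate_combinations(spring_condition):
--     combos = [""]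
--     chunk = []  # pending run of fixed characters since the last '?'
--     for ch in spring_condition:
--         if ch == "?":
--             prefix = "".join(chunk)
--             chunk = []
--             combos = [c + prefix + r for c in combos for r in "#."]
--         else:
--             chunk.append(ch)
--     tail = "".join(chunk)
--     return [c + tail for c in combos]
-- ===== Notes on version B (the rewrite author's own statement) =====
-- stated objective: faster
-- what changed: B replaces the index-list + itertools.product + per-tuple list-mutation pipeline by a single left-to-right pass that keeps the list of partial combinations and a pending run of fixed characters, doubling the combinations ('#' before '.') at each '?'.
import Mathlib
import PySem

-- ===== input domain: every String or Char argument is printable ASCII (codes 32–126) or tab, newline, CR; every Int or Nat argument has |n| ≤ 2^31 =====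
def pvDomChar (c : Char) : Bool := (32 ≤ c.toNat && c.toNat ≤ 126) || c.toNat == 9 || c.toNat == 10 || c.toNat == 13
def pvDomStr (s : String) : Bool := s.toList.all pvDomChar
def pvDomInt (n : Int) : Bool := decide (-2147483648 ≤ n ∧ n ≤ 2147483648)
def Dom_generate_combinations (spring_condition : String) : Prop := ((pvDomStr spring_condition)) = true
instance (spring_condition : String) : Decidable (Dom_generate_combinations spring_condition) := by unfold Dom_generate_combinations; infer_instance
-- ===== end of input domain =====

-- B replaces the index-list + itertools.product + list-mutation pipeline of A by one
-- left-to-right pass expanding a list of partial combinations at each '?'; same output.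

-- ===== PORT A =====
-- [i for i, char in enumerate(spring_condition) if char == "?"]
def pvQIdx (cs : List Char) : List Int :=
  (PySem.List.enumerate cs 0).filterMap (fun p => if p.2 = '?' then some p.1 else none)

-- itertools.product("#.", repeat=k): tuples in order, first coordinate varies slowest
def pvProd : Nat → List (List Char)
  | 0 => [[]]
  | k + 1 => ['#', '.'].flatMap (fun c => (pvProd k).map (c :: ·))

def generate_combinations (spring_condition : String) : List String :=
  let cs := spring_condition.toList
  let question_indices := pvQIdx cs
  let replacements := pvProd question_indices.length
  replacements.foldl
    (fun combinations replacement =>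
      combinations ++
        [String.ofList ((question_indices.zip replacement).foldl
          (fun cur p => PySem.List.pySetD cur p.1 p.2) cs)]) []

-- ===== PORT B =====
-- loop body of Source B: state = (combos, chunk of fixed characters since the last '?')
def pvStep (st : List (List Char) × List Char) (ch : Char) :
    List (List Char) × List Char :=
  if ch = '?' then
    (st.1.flatMap (fun c => ['#', '.'].map (fun r => c ++ st.2 ++ [r])), [])
  else (st.1, st.2 ++ [ch])

def generate_combinations_alt (spring_condition : String) : List String :=
  let st := spring_condition.toList.foldl pvStep ([[]], [])
  (st.1.map (· ++ st.2)).map String.ofList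

-- ===== PRECONDITION & SPEC =====
def Spec_generate_combinations (spring_condition : String) (out : List String) : Prop := out = generate_combinations_alt spring_condition
instance (spring_condition : String) (out : List String) : Decidable (Spec_generate_combinations spring_condition out) := by unfold Spec_generate_combinations; infer_instance

-- ===== CLAIM (what is proved, stated in full; the proofs are below) =====
def Claim_equal_generate_combinations : Prop := ∀ (spring_condition : String), Dom_generate_combinations spring_condition → Spec_generate_combinations spring_condition (generate_combinations spring_condition)

-- ===== LEMMAS AND PROOFS =====

-- proof-side bridge: the recursive characterisation both ports are reduced to
def pvWalk : List Char → List (List Char)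
  | [] => [[]]
  | c :: rest =>
    let tails := pvWalk rest
    if c = '?' then tails.map ('#' :: ·) ++ tails.map ('.' :: ·)
    else tails.map (c :: ·)

theorem pvEnumerate_shift (cs : List Char) (s : Int) :
    PySem.List.enumerate cs (s + 1) =
      (PySem.List.enumerate cs s).map (fun p => (p.1 + 1, p.2)) := by
  induction cs generalizing s with
  | nil => simp [PySem.List.enumerate_nil]
  | cons c t ih =>
    simp only [PySem.List.enumerate_cons, List.map_cons]
    exact congrArg (List.cons _) (ih (s + 1))

theorem pvQIdx_nonneg (cs : List Char) : ∀ i ∈ pvQIdx cs, 0 ≤ i := by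
  intro i hi
  unfold pvQIdx at hi
  rcases List.mem_filterMap.1 hi with ⟨p, hp, hif⟩
  rcases (PySem.List.mem_enumerate_iff _ _ _).1 hp with ⟨k, hk, rfl⟩
  split at hif <;> simp_all
  omega

-- the heart of the shift argument: setting at indices + 1 leaves the head untouched
theorem pvFoldl_set_cons (ps : List (Int × Char)) (c : Char) (l : List Char)
    (h : ∀ p ∈ ps, 0 ≤ p.1) :
    ps.foldl (fun cur p => PySem.List.pySetD cur (p.1 + 1) p.2) (c :: l) =
      c :: ps.foldl (fun cur p => PySem.List.pySetD cur p.1 p.2) l := by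
  induction ps generalizing l with
  | nil => rfl
  | cons q qs ih =>
    have hq : 0 ≤ q.1 := h q (List.mem_cons_self ..)
    have hstep : PySem.List.pySetD (c :: l) (q.1 + 1) q.2 =
        c :: PySem.List.pySetD l q.1 q.2 := by
      rw [PySem.List.pySetD_of_nonneg _ _ (by omega),
          PySem.List.pySetD_of_nonneg _ _ hq]
      have : (q.1 + 1).toNat = q.1.toNat + 1 := by omega
      simp [this]
    simp only [List.foldl_cons, hstep]
    exact ih _ (fun p hp => h p (List.mem_cons_of_mem _ hp))

theorem pvQIdx_cons (c : Char) (t : List Char) :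
    pvQIdx (c :: t) =
      (if c = '?' then [(0 : Int)] else []) ++ (pvQIdx t).map (· + 1) := by
  unfold pvQIdx
  rw [PySem.List.enumerate_cons, List.filterMap_cons]
  have h1 : PySem.List.enumerate t (0 + 1) =
      (PySem.List.enumerate t 0).map (fun p => (p.1 + 1, p.2)) := by
    simpa using pvEnumerate_shift t 0
  rw [h1, List.filterMap_map, List.map_filterMap]
  have h2 : ∀ l : List (Int × Char),
      List.filterMap ((fun p : Int × Char => if p.2 = '?' then some p.1 else none) ∘
        (fun p : Int × Char => (p.1 + 1, p.2))) l =
      List.filterMap (fun p : Int × Char =>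
        Option.map (· + 1) (if p.2 = '?' then some p.1 else none)) l := by
    intro l
    congr 1
    funext p
    by_cases hp : p.2 = '?' <;> simp [hp]
  rw [h2]
  by_cases hc : c = '?' <;> simp [hc]

-- A's substitution at shifted indices over a cons is the cons of the substitution
theorem pvSubst_shift (t : List Char) (r : List Char) (c : Char) (l : List Char) :
    (((pvQIdx t).map (· + 1)).zip r).foldl
        (fun cur p => PySem.List.pySetD cur p.1 p.2) (c :: l) =
      c :: ((pvQIdx t).zip r).foldl
        (fun cur p => PySem.List.pySetD cur p.1 p.2) l := by
  rw [List.zip_map_left, List.foldl_map]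
  exact pvFoldl_set_cons _ c l
    (fun p hp => pvQIdx_nonneg t p.1 (List.of_mem_zip hp).1)

-- A reduced to the bridge
theorem pvMain (cs : List Char) :
    (pvProd (pvQIdx cs).length).map
        (fun r => ((pvQIdx cs).zip r).foldl
          (fun cur p => PySem.List.pySetD cur p.1 p.2) cs) =
      pvWalk cs := by
  induction cs with
  | nil => simp [pvQIdx, PySem.List.enumerate_nil, pvProd, pvWalk]
  | cons c t ih =>
    rw [pvQIdx_cons]
    by_cases hc : c = '?'
    · rw [if_pos hc, List.singleton_append]
      subst hc
      have hw : pvWalk ('?' :: t) =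
          (pvWalk t).map ('#' :: ·) ++ (pvWalk t).map ('.' :: ·) := by
        simp [pvWalk]
      rw [hw]
      have hlen : ((0 : Int) :: (pvQIdx t).map (· + 1)).length =
          (pvQIdx t).length + 1 := by simp
      rw [hlen]
      show (['#', '.'].flatMap fun x => (pvProd (pvQIdx t).length).map (x :: ·)).map _ = _
      rw [List.flatMap_cons, List.flatMap_cons, List.flatMap_nil, List.append_nil,
        List.map_append, List.map_map, List.map_map]
      congr 1 <;>
      · rw [← ih, List.map_map]
        apply List.map_congr_left
        intro r _
        simp only [Function.comp_apply, List.zip_cons_cons, List.foldl_cons]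
        have h0 : ∀ x : Char, PySem.List.pySetD ('?' :: t) 0 x = x :: t := by
          intro x
          rw [PySem.List.pySetD_of_nonneg _ _ (by omega)]
          simp
        rw [h0]
        exact pvSubst_shift t r _ t
    · rw [if_neg hc, List.nil_append]
      have hw : pvWalk (c :: t) = (pvWalk t).map (c :: ·) := by
        simp [pvWalk, hc]
      rw [hw, ← ih, List.map_map, List.length_map]
      apply List.map_congr_left
      intro r _
      simp only [Function.comp_apply]
      exact pvSubst_shift t r c t

-- a '?'-free prefix factors out of the bridge
theorem pvWalk_append (pre rest : List Char) (h : '?' ∉ pre) :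
    pvWalk (pre ++ rest) = (pvWalk rest).map (pre ++ ·) := by
  induction pre with
  | nil => simp
  | cons c p ih =>
    have hc : ¬ c = '?' := fun e => h (by rw [e]; exact List.mem_cons_self ..)
    have hp : '?' ∉ p := fun e => h (List.mem_cons_of_mem _ e)
    simp [pvWalk, hc, ih hp, List.map_map, Function.comp_def]

-- B's loop invariant: finishing the fold yields each partial combination crossed
-- with every completion of the unprocessed suffix (prefixed by the pending chunk)
theorem pvInvariant (cs : List Char) (combos : List (List Char)) (chunk : List Char)
    (h : '?' ∉ chunk) :
    ((cs.foldl pvStep (combos, chunk)).1).map (· ++ (cs.foldl pvStep (combos, chunk)).2) =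
      combos.flatMap (fun c => (pvWalk (chunk ++ cs)).map (c ++ ·)) := by
  induction cs generalizing combos chunk with
  | nil =>
    rw [List.foldl_nil]
    simp only [List.append_nil]
    have hw : pvWalk chunk = [chunk] := by
      simpa [pvWalk] using pvWalk_append chunk [] h
    simp only [hw, List.map_cons, List.map_nil]
    exact List.map_eq_flatMap
  | cons ch t ih =>
    by_cases hch : ch = '?'
    · subst hch
      rw [List.foldl_cons,
        show pvStep (combos, chunk) '?' =
          (combos.flatMap (fun c => ['#', '.'].map (fun r => c ++ chunk ++ [r])), []) from rfl,
        ih _ [] (List.not_mem_nil), pvWalk_append chunk ('?' :: t) h]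
      rw [List.flatMap_assoc]
      congr 1
      funext c
      simp [pvWalk, List.map_map, Function.comp_def, List.append_assoc]
    · rw [List.foldl_cons,
        show pvStep (combos, chunk) ch = (combos, chunk ++ [ch]) from by
          simp [pvStep, hch],
        ih _ (chunk ++ [ch]) (by
          intro e
          rcases List.mem_append.1 e with e | e
          · exact h e
          · simp at e; exact hch e.symm)]
      simp [List.append_assoc]

-- ===== VERDICT (by name: the statement is the Claim_ definition above) =====
theorem generate_combinations_spec : Claim_equal_generate_combinations := by
  intro s _
  unfold Spec_generate_combinations generate_combinations generate_combinations_alt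
  rw [PySem.List.foldl_append_singleton_eq_map, List.nil_append]
  have hA : (pvProd (pvQIdx s.toList).length).map
      (fun r => String.ofList (((pvQIdx s.toList).zip r).foldl
        (fun cur p => PySem.List.pySetD cur p.1 p.2) s.toList)) =
      (pvWalk s.toList).map String.ofList := by
    rw [← pvMain s.toList, List.map_map]
    simp [Function.comp_def]
  rw [hA]
  have hB := pvInvariant s.toList [[]] [] (List.not_mem_nil)
  simp only [List.nil_append, List.flatMap_cons, List.flatMap_nil, List.append_nil] at hB
  simp [hB]
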